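-- pv_equiv track=rewrite | github.com/zsy-ctrl/geomapgen | unimapgen/train_geo_model.py | _group_sample_indices
-- ===== SOURCE A (Python) =====
-- from collections import OrderedDict
--
-- def _group_sample_indices(items, task_order: dict[str, int]) -> OrderedDict[str, list[int]]:
--     grouped: OrderedDict[str, list[tuple[int, dict]]] = OrderedDict()
--     for index, item in enumerate(items):
--         sample_id = str(item.get("sample_id", ""))
--         grouped.setdefault(sample_id, []).append((int(index), item))
--     ordered: OrderedDict[str, list[int]] = OrderedDict()
--     for sample_id, entries in grouped.items():
--         entries.sort(
--             key=lambda pair: (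
--                 int(pair[1].get("tile_index", 0)),
--                 int(task_order.get(str(pair[1].get("task_name", "")), 10**6)),
--                 int(pair[0]),
--             )
--         )
--         ordered[sample_id] = [int(index) for index, _ in entries]
--     return ordered
-- ===== SOURCE B (Python) =====
-- from collections import OrderedDict
--
--
-- def _group_sample_indices(items, task_order):
--     # Rank each sample_id by first appearance, in one pass.
--     rank = {}
--     for item in items:
--         sid = str(item.get("sample_id", ""))
--         if sid not in rank:
--             rank[sid] = len(rank)
--
--     def key(pair):
--         index, item = pair
--         return (
--             rank[str(item.get("sample_id", ""))],
--             int(item.get("tile_index", 0)),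
--             int(task_order.get(str(item.get("task_name", "")), 10**6)),
--             index,
--         )
--
--     # One global sort by (sample rank, tile, task, index), then a single
--     # grouping pass; keys enter the OrderedDict in rank order.
--     ordered = OrderedDict()
--     for index, item in sorted(enumerate(items), key=key):
--         ordered.setdefault(str(item.get("sample_id", "")), []).append(index)
--     return ordered
-- ===== Notes on version B (the rewrite author's own statement) =====
-- stated objective: alternative
-- what changed: A buckets (index, item) pairs per sample_id and runs a separate key-sort inside each bucket; B instead precomputes a first-appearance rank per sample_id, performs ONE global sort of all (index, item) pairs under the compound key (rank, tile_index, task_order, index), and then groups the globally sorted list in a single pass.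
import Mathlib
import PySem

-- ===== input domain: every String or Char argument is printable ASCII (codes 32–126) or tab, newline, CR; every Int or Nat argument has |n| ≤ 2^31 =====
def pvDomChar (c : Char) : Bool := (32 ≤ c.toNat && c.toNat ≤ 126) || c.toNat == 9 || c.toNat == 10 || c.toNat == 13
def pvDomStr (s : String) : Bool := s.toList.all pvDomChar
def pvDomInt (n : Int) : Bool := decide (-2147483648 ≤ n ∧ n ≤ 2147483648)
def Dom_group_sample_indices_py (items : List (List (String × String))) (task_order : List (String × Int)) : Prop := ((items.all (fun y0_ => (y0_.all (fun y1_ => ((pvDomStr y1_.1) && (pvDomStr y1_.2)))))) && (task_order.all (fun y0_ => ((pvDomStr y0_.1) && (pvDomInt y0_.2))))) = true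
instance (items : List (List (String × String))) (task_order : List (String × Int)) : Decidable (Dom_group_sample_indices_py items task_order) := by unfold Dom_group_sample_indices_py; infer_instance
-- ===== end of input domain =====

-- B replaces A's per-sample bucket sorts by ONE global sort of (index, item) pairs under a
-- compound key led by each sample_id's first-appearance rank, followed by a single grouping
-- pass over the sorted list (objective: alternative decomposition, same cost).

-- ===== PORT A =====
-- str(item.get("sample_id", "")) — the value is already a string, str() is the identity
def pvSid (item : List (String × String)) : String :=
  (PySem.Dict.mk item).getD "sample_id" ""

-- int(item.get("tile_index", 0)); when the key is present int() parses the string —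
-- a failing parse is a Python ValueError, excluded by Pre_ (the .getD 0 is never reached there)
def pvTile (item : List (String × String)) : Int :=
  match (PySem.Dict.mk item).get? "tile_index" with
  | none => 0
  | some s => (PySem.Int.ofStr? s).getD 0

-- int(task_order.get(str(item.get("task_name", "")), 10**6)) — values are ints, int() is the identity
def pvTask (task_order : List (String × Int)) (item : List (String × String)) : Int :=
  (PySem.Dict.mk task_order).getD ((PySem.Dict.mk item).getD "task_name" "") 1000000

-- A's sort key (tile, task, index); Python's tuple order is the lexicographic order Lex encodes
def pvKeyA (task_order : List (String × Int)) (p : Int × List (String × String)) :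
    Lex (Int × Lex (Int × Int)) :=
  toLex (pvTile p.2, toLex (pvTask task_order p.2, p.1))

def group_sample_indices_py (items : List (List (String × String))) (task_order : List (String × Int)) : List (String × List Int) :=
  let grouped : PySem.Dict String (List (Int × List (String × String))) :=
    (PySem.List.enumerate items 0).foldl
      (fun d p => d.modify (pvSid p.2) [] (fun l => l ++ [p]))
      PySem.Dict.empty
  (grouped.items.foldl
    (fun (ordered : PySem.Dict String (List Int)) e =>
      ordered.insert e.1 ((PySem.List.sorted e.2 (pvKeyA task_order)).map (fun q => q.1)))
    PySem.Dict.empty).items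

-- ===== PORT B =====
-- B's sort key (rank of sample_id, tile, task, index); Python's 4-tuple order, Lex-encoded
def pvKeyB (rank : PySem.Dict String Int) (task_order : List (String × Int))
    (p : Int × List (String × String)) : Lex (Int × Lex (Int × Lex (Int × Int))) :=
  toLex (rank.getD (pvSid p.2) 0, pvKeyA task_order p)

def group_sample_indices_py_alt (items : List (List (String × String))) (task_order : List (String × Int)) : List (String × List Int) :=
  let rank : PySem.Dict String Int :=
    items.foldl
      (fun d item =>
        if d.contains (pvSid item) then d else d.insert (pvSid item) (d.size : Int))
      PySem.Dict.empty
  ((PySem.List.sorted (PySem.List.enumerate items 0) (pvKeyB rank task_order)).foldl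
    (fun (ordered : PySem.Dict String (List Int)) p =>
      ordered.modify (pvSid p.2) [] (fun l => l ++ [p.1]))
    PySem.Dict.empty).items

-- ===== PRECONDITION & SPEC =====
-- Pre_ excludes exactly the inputs where int() raises ValueError in both programs:
-- an item whose "tile_index" value does not parse as a Python int literal.
def Pre_group_sample_indices_py (items : List (List (String × String))) (task_order : List (String × Int)) : Prop :=
  (items.all (fun item =>
    match (PySem.Dict.mk item).get? "tile_index" with
    | none => true
    | some s => (PySem.Int.ofStr? s).isSome)) = true

instance (items : List (List (String × String))) (task_order : List (String × Int)) : Decidable (Pre_group_sample_indices_py items task_order) := by unfold Pre_group_sample_indices_py; infer_instance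

def pvWitness_group_sample_indices_py : (List (List (String × String))) × (List (String × Int)) :=
  ([[("sample_id", "a"), ("tile_index", "2"), ("task_name", "t")],
    [("sample_id", "b"), ("tile_index", "1")],
    [("sample_id", "a"), ("tile_index", "1"), ("task_name", "u")]],
   [("t", 5), ("u", 1)])

def Spec_group_sample_indices_py (items : List (List (String × String))) (task_order : List (String × Int)) (out : List (String × List Int)) : Prop := out = group_sample_indices_py_alt items task_order
instance (items : List (List (String × String))) (task_order : List (String × Int)) (out : List (String × List Int)) : Decidable (Spec_group_sample_indices_py items task_order out) := by unfold Spec_group_sample_indices_py; infer_instance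

-- ===== CLAIM (what is proved, stated in full; the proofs are below) =====
def Claim_equal_group_sample_indices_py : Prop := ∀ (items : List (List (String × String))) (task_order : List (String × Int)), Dom_group_sample_indices_py items task_order → Pre_group_sample_indices_py items task_order → Spec_group_sample_indices_py items task_order (group_sample_indices_py items task_order)

-- ===== LEMMAS AND PROOFS =====

-- the common canonical form both ports are reduced to
def pvE (items : List (List (String × String))) : List (Int × List (String × String)) :=
  PySem.List.enumerate items 0

def pvS (items : List (List (String × String))) : List String :=
  PySem.Set.ofList (items.map pvSid)

def pvFilt (items : List (List (String × String))) (s : String) :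
    List (Int × List (String × String)) :=
  (pvE items).filter (fun p => pvSid p.2 == s)

def pvBlk (items : List (List (String × String))) (task_order : List (String × Int)) (s : String) :
    List (Int × List (String × String)) :=
  PySem.List.sorted (pvFilt items s) (pvKeyA task_order)

def pvCanon (items : List (List (String × String))) (task_order : List (String × Int)) :
    List (String × List Int) :=
  (pvS items).map (fun s => (s, (pvBlk items task_order s).map (fun p => p.1)))

theorem fold_modify_items {β : Type} (L : List (Int × List (String × String)))
    (f : Int × List (String × String) → β) :
    (L.foldl (fun d p => d.modify (pvSid p.2) [] (fun l => l ++ [f p])) PySem.Dict.empty).items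
      = (PySem.Set.ofList (L.map (fun p => pvSid p.2))).map
          (fun s => (s, (L.filter (fun p => pvSid p.2 == s)).map f)) := by
  have hfold : (L.foldl (fun d p => d.modify (pvSid p.2) [] (fun l => l ++ [f p])) (PySem.Dict.empty : PySem.Dict String (List β)))
      = (L.map (fun p => (pvSid p.2, f p))).foldl (fun d q => d.modify q.1 [] (fun l => l ++ [q.2])) PySem.Dict.empty := by
    rw [List.foldl_map]
  have hkeys : (L.foldl (fun d p => d.modify (pvSid p.2) [] (fun l => l ++ [f p])) (PySem.Dict.empty : PySem.Dict String (List β))).keys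
      = PySem.Set.ofList (L.map (fun p => pvSid p.2)) := by
    rw [PySem.Dict.keys_foldl_modify_key L (fun p => pvSid p.2) [] (fun _ p l => l ++ [f p])]
    rfl
  have hnodup : (PySem.Set.ofList (L.map (fun p => pvSid p.2))).Nodup := PySem.Set.nodup_ofList _
  have hgetD : ∀ c, (L.foldl (fun d p => d.modify (pvSid p.2) [] (fun l => l ++ [f p])) (PySem.Dict.empty : PySem.Dict String (List β))).getD c []
      = (L.filter (fun p => pvSid p.2 == c)).map f := by
    intro c
    rw [hfold, PySem.Dict.getD_foldl_modify_append]
    simp [List.filter_map, Function.comp_def]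
  rw [PySem.Dict.items_eq_map_keys _ (hkeys ▸ hnodup) []]
  rw [hkeys]
  exact List.map_congr_left (fun s _ => by rw [hgetD])

theorem grouped_items (items : List (List (String × String))) :
    ((pvE items).foldl (fun d p => d.modify (pvSid p.2) [] (fun l => l ++ [p])) PySem.Dict.empty).items
      = (pvS items).map (fun s => (s, pvFilt items s)) := by
  rw [fold_modify_items (pvE items) (fun p => p)]
  have hm : (pvE items).map (fun p => pvSid p.2) = items.map pvSid := by
    rw [show (fun (p : Int × List (String × String)) => pvSid p.2) = pvSid ∘ (fun p => p.2) from rfl,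
      ← List.map_map, pvE, PySem.List.map_snd_enumerate]
  rw [hm]
  simp [pvS, pvFilt]

theorem pvA_canon (items : List (List (String × String))) (task_order : List (String × Int)) :
    group_sample_indices_py items task_order = pvCanon items task_order := by
  simp only [group_sample_indices_py]
  rw [show PySem.List.enumerate items 0 = pvE items from rfl, grouped_items]
  rw [PySem.Dict.items_foldl_insert_fresh ((pvS items).map (fun s => (s, pvFilt items s)))
    (fun e => e.1)
    (fun e => (PySem.List.sorted e.2 (pvKeyA task_order)).map (fun q => q.1))
    PySem.Dict.empty
    (by simp [PySem.Dict.contains_empty])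
    (by simp only [List.map_map, Function.comp_def, List.map_id']
        exact PySem.Set.nodup_ofList (items.map pvSid))]
  simp [pvCanon, pvBlk, pvFilt, List.map_map, Function.comp_def, PySem.Dict.empty]

-- B's first-appearance rank dict, as built by the port's fold
def pvRank (items : List (List (String × String))) : PySem.Dict String Int :=
  items.foldl
    (fun d item =>
      if d.contains (pvSid item) then d else d.insert (pvSid item) (d.size : Int))
    PySem.Dict.empty

theorem rank_fold_items (l : List String) :
    (l.foldl (fun d s => if d.contains s then d else d.insert s (d.size : Int)) PySem.Dict.empty).items
      = (PySem.List.enumerate (PySem.Set.ofList l) 0).map (fun q => (q.2, q.1)) := by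
  induction l using List.reverseRecOn with
  | nil => rfl
  | append_singleton l x ih =>
    rw [List.foldl_append]
    have hofl : PySem.Set.ofList (l ++ [x]) = PySem.Set.add (PySem.Set.ofList l) x := by
      rw [PySem.Set.ofList_eq_foldl, PySem.Set.ofList_eq_foldl, List.foldl_append]
      rfl
    set d := l.foldl (fun d s => if d.contains s then d else d.insert s (d.size : Int)) PySem.Dict.empty with hd
    have hkeys : d.keys = PySem.Set.ofList l := by
      show d.items.map (fun p => p.1) = _
      rw [ih, List.map_map]
      have : ((fun (p : String × Int) => p.1) ∘ (fun (q : Int × String) => (q.2, q.1)))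
          = (fun (q : Int × String) => q.2) := rfl
      rw [this, PySem.List.map_snd_enumerate]
    have hcont : d.contains x = decide (x ∈ PySem.Set.ofList l) := by
      rw [PySem.Dict.contains_eq_decide_mem_keys, hkeys]
    by_cases hx : x ∈ PySem.Set.ofList l
    · have hadd : PySem.Set.add (PySem.Set.ofList l) x = PySem.Set.ofList l := by
        simp [PySem.Set.add, PySem.Set.contains, hx]
      have hc : d.contains x = true := by rw [hcont]; simp [hx]
      simp only [List.foldl_cons, List.foldl_nil, hc, if_true, hofl, hadd, ih]
    · have hadd : PySem.Set.add (PySem.Set.ofList l) x = PySem.Set.ofList l ++ [x] := by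
        simp [PySem.Set.add, PySem.Set.contains, hx]
      have hsize : (d.size : Int) = ((PySem.Set.ofList l).length : Int) := by
        show ((d.items.length : Nat) : Int) = _
        rw [ih]
        simp
      have hc : d.contains x = false := by rw [hcont]; simp [hx]
      have hstep : (List.foldl (fun d s => if d.contains s = true then d else d.insert s (d.size : Int)) d [x])
          = d.insert x (d.size : Int) := by
        simp only [List.foldl_cons, List.foldl_nil, hc, Bool.false_eq_true, if_false]
      rw [hstep, PySem.Dict.items_insert_of_not_contains d _ hc, ih, hofl, hadd,
        PySem.List.enumerate_append, PySem.List.enumerate_cons, PySem.List.enumerate_nil,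
        List.map_append, hsize]
      simp

theorem pvRank_items (items : List (List (String × String))) :
    (pvRank items).items = (PySem.List.enumerate (pvS items) 0).map (fun q => (q.2, q.1)) := by
  have h : pvRank items
      = (items.map pvSid).foldl
          (fun d s => if d.contains s then d else d.insert s (d.size : Int)) PySem.Dict.empty := by
    rw [List.foldl_map]
    rfl
  rw [h, rank_fold_items]
  rfl

theorem pvRank_keys (items : List (List (String × String))) :
    (pvRank items).keys = pvS items := by
  show (pvRank items).items.map (fun p => p.1) = _
  rw [pvRank_items, List.map_map]
  have : ((fun (p : String × Int) => p.1) ∘ (fun (q : Int × String) => (q.2, q.1)))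
      = (fun (q : Int × String) => q.2) := rfl
  rw [this, PySem.List.map_snd_enumerate]

theorem pvRank_getD (items : List (List (String × String))) (j : Nat)
    (h : j < (pvS items).length) :
    (pvRank items).getD (pvS items)[j] 0 = (j : Int) := by
  have hmem : ((pvS items)[j], ((0 : Int) + j)) ∈ (pvRank items).items := by
    rw [pvRank_items]
    exact List.mem_map.mpr ⟨((0 : Int) + j, (pvS items)[j]),
      (PySem.List.mem_enumerate_iff _ _ _).mpr ⟨j, h, rfl⟩, rfl⟩
  have hnd : (pvRank items).keys.Nodup := by
    rw [pvRank_keys]; exact PySem.Set.nodup_ofList _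
  rw [PySem.Dict.getD_of_mem_items _ hmem hnd]
  simp

theorem pvRank_pairwise (items : List (List (String × String))) :
    (pvS items).Pairwise (fun s t => (pvRank items).getD s 0 < (pvRank items).getD t 0) := by
  rw [List.pairwise_iff_getElem]
  intro i j hi hj hij
  rw [pvRank_getD items i hi, pvRank_getD items j hj]
  exact_mod_cast hij

theorem mem_blk_sid {items : List (List (String × String))} {task_order : List (String × Int)}
    {s : String} {p : Int × List (String × String)} (hp : p ∈ pvBlk items task_order s) :
    pvSid p.2 = s := by
  have h := (PySem.List.mem_sorted _ _ _ _).1 hp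
  have := (List.mem_filter.mp h).2
  exact eq_of_beq this

theorem blk_perm_filt (items : List (List (String × String))) (task_order : List (String × Int))
    (s : String) : (pvBlk items task_order s).Perm (pvFilt items s) :=
  PySem.List.sorted_perm _ _ _

theorem blk_pairwise_keyA (items : List (List (String × String)))
    (task_order : List (String × Int)) (s : String) :
    (pvBlk items task_order s).Pairwise (fun a b => pvKeyA task_order a < pvKeyA task_order b) := by
  have hle := PySem.List.sorted_pairwise (pvFilt items s) (pvKeyA task_order)
  have hfilt : (pvFilt items s).Pairwise (fun a b => a.1 < b.1) :=
    (PySem.List.pairwise_lt_enumerate items 0).filter _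
  have hndf : ((pvFilt items s).map (fun p => p.1)).Nodup :=
    List.pairwise_map.mpr (hfilt.imp ne_of_lt)
  have hndb : ((pvBlk items task_order s).map (fun p => p.1)).Nodup :=
    hndf.perm ((blk_perm_filt items task_order s).map _).symm
  have hne : (pvBlk items task_order s).Pairwise (fun a b => a.1 ≠ b.1) :=
    List.pairwise_map.mp hndb
  exact (hle.and hne).imp (fun {a b} h => by
    refine lt_of_le_of_ne h.1 (fun he => h.2 ?_)
    simp only [pvKeyA, toLex_inj, Prod.ext_iff] at he
    exact he.2.2)

theorem blk_pairwise_keyB (items : List (List (String × String)))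
    (task_order : List (String × Int)) (s : String) :
    (pvBlk items task_order s).Pairwise
      (fun a b => pvKeyB (pvRank items) task_order a < pvKeyB (pvRank items) task_order b) := by
  refine (blk_pairwise_keyA items task_order s).imp_of_mem (fun {a b} ha hb hlt => ?_)
  show toLex _ < toLex _
  rw [Prod.Lex.toLex_lt_toLex]
  right
  exact ⟨by rw [mem_blk_sid ha, mem_blk_sid hb], hlt⟩

theorem partition_perm (S : List String) (E : List (Int × List (String × String)))
    (hnd : S.Nodup) (hmem : ∀ p ∈ E, pvSid p.2 ∈ S) :
    (S.flatMap (fun s => E.filter (fun p => pvSid p.2 == s))).Perm E := by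
  induction S generalizing E with
  | nil =>
    have : E = [] := List.eq_nil_iff_forall_not_mem.mpr (fun p hp => by simpa using hmem p hp)
    simp [this]
  | cons s S' ih =>
    rw [List.flatMap_cons]
    have hcong : S'.flatMap (fun t => E.filter (fun p => pvSid p.2 == t))
        = S'.flatMap (fun t => (E.filter (fun p => !(pvSid p.2 == s))).filter (fun p => pvSid p.2 == t)) := by
      refine List.flatMap_congr (fun t ht => ?_)
      have hts : t ≠ s := fun he => (List.nodup_cons.mp hnd).1 (he ▸ ht)
      rw [List.filter_filter]
      refine (List.filter_congr (fun p hp => ?_)).symm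
      by_cases h : pvSid p.2 = t
      · simp [h, hts]
      · simp [h]
    rw [hcong]
    have hperm := ih (E.filter (fun p => !(pvSid p.2 == s))) (List.nodup_cons.mp hnd).2
      (fun p hp => by
        have h1 := hmem p (List.mem_of_mem_filter hp)
        have h2 := List.of_mem_filter hp
        rcases List.mem_cons.mp h1 with he | hm
        · exact absurd he (by simpa using h2)
        · exact hm)
    exact (List.Perm.append_left _ hperm).trans (List.filter_append_perm _ E)

theorem set_update_of_mem (l acc : List String) (h : ∀ x ∈ l, x ∈ acc) :
    PySem.Set.update acc l = acc := by
  induction l generalizing acc with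
  | nil => rfl
  | cons x t ih =>
    have hadd : PySem.Set.add acc x = acc := by
      simp [PySem.Set.add, PySem.Set.contains, h x List.mem_cons_self]
    show PySem.Set.update (PySem.Set.add acc x) t = acc
    rw [hadd]
    exact ih acc (fun y hy => h y (List.mem_cons_of_mem _ hy))

theorem set_update_const (l : List String) (s : String) (acc : List String) (hne : l ≠ [])
    (hall : ∀ x ∈ l, x = s) (hs : s ∉ acc) :
    PySem.Set.update acc l = acc ++ [s] := by
  cases l with
  | nil => exact absurd rfl hne
  | cons x t =>
    have hx : x = s := hall x List.mem_cons_self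
    have hadd : PySem.Set.add acc x = acc ++ [s] := by
      subst hx
      simp [PySem.Set.add, PySem.Set.contains, hs]
    show PySem.Set.update (PySem.Set.add acc x) t = acc ++ [s]
    rw [hadd]
    exact set_update_of_mem t _ (fun y hy => by
      rw [hall y (List.mem_cons_of_mem _ hy)]; simp)

theorem set_update_flatMap_sid (g : String → List (Int × List (String × String))) :
    ∀ (S acc : List String), S.Nodup → (∀ s ∈ S, s ∉ acc) → (∀ s ∈ S, g s ≠ []) →
      (∀ s ∈ S, ∀ p ∈ g s, pvSid p.2 = s) →
      PySem.Set.update acc ((S.flatMap g).map (fun p => pvSid p.2)) = acc ++ S := by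
  intro S
  induction S with
  | nil => intro acc _ _ _ _; simp [PySem.Set.update]

  | cons s S' ih =>
    intro acc hnd hacc hne hsid
    rw [List.flatMap_cons, List.map_append]
    have hsplit : PySem.Set.update acc (((g s).map (fun p => pvSid p.2)) ++ ((S'.flatMap g).map (fun p => pvSid p.2)))
        = PySem.Set.update (PySem.Set.update acc ((g s).map (fun p => pvSid p.2))) ((S'.flatMap g).map (fun p => pvSid p.2)) := by
      simp [PySem.Set.update, List.foldl_append]
    rw [hsplit]
    have h1 : PySem.Set.update acc ((g s).map (fun p => pvSid p.2)) = acc ++ [s] := by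
      refine set_update_const _ s _ ?_ ?_ (hacc s List.mem_cons_self)
      · simp [hne s List.mem_cons_self]
      · intro x hx
        obtain ⟨p, hp, rfl⟩ := List.mem_map.mp hx
        exact hsid s List.mem_cons_self p hp
    rw [h1]
    rw [ih (acc ++ [s]) (List.nodup_cons.mp hnd).2
      (fun t ht => by
        simp only [List.mem_append, List.mem_singleton]
        rintro (h | rfl)
        · exact hacc t (List.mem_cons_of_mem _ ht) h
        · exact (List.nodup_cons.mp hnd).1 ht)
      (fun t ht => hne t (List.mem_cons_of_mem _ ht))
      (fun t ht => hsid t (List.mem_cons_of_mem _ ht))]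
    simp

theorem ofList_flatMap_sid (g : String → List (Int × List (String × String))) (S : List String)
    (hnd : S.Nodup) (hne : ∀ s ∈ S, g s ≠ []) (hsid : ∀ s ∈ S, ∀ p ∈ g s, pvSid p.2 = s) :
    PySem.Set.ofList ((S.flatMap g).map (fun p => pvSid p.2)) = S := by
  have h := set_update_flatMap_sid g S [] hnd (by simp) hne hsid
  simpa [PySem.Set.ofList_eq_foldl, PySem.Set.update] using h

theorem blk_ne_nil (items : List (List (String × String))) (task_order : List (String × Int))
    (s : String) (hs : s ∈ pvS items) : pvBlk items task_order s ≠ [] := by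
  rw [Ne, pvBlk, PySem.List.sorted_eq_nil_iff]
  intro hfilt
  have hs' : s ∈ items.map pvSid := (PySem.Set.mem_ofList _ _).mp hs
  obtain ⟨item, hitem, hsid⟩ := List.mem_map.mp hs'
  obtain ⟨k, hk, hget⟩ := List.mem_iff_getElem.mp hitem
  have hmem : ((0 : Int) + k, items[k]) ∈ pvE items :=
    (PySem.List.mem_enumerate_iff _ _ _).mpr ⟨k, hk, rfl⟩
  have : ((0 : Int) + k, items[k]) ∈ pvFilt items s :=
    List.mem_filter.mpr ⟨hmem, by simp [hget, hsid]⟩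
  rw [hfilt] at this
  exact List.not_mem_nil this

theorem flatMap_blk_filter (items : List (List (String × String))) (task_order : List (String × Int))
    (s : String) :
    ∀ S : List String, S.Nodup → s ∈ S →
      ((S.flatMap (pvBlk items task_order)).filter (fun p => pvSid p.2 == s))
        = pvBlk items task_order s := by
  intro S
  induction S with
  | nil => intro _ h; exact absurd h List.not_mem_nil
  | cons t S' ih =>
    intro hnd hs
    rw [List.flatMap_cons, List.filter_append]
    by_cases hst : s = t
    · subst hst
      have h1 : (pvBlk items task_order s).filter (fun p => pvSid p.2 == s)
          = pvBlk items task_order s :=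
        List.filter_eq_self.mpr (fun p hp => by rw [mem_blk_sid hp]; simp)
      have h2 : ((S'.flatMap (pvBlk items task_order)).filter (fun p => pvSid p.2 == s)) = [] := by
        refine List.filter_eq_nil_iff.mpr (fun p hp => ?_)
        obtain ⟨t', ht', hpt⟩ := List.mem_flatMap.mp hp
        have : pvSid p.2 = t' := mem_blk_sid hpt
        have hne : t' ≠ s := fun he => (List.nodup_cons.mp hnd).1 (he ▸ ht')
        simp [this, hne]
      rw [h1, h2, List.append_nil]
    · have hs' : s ∈ S' := by
        rcases List.mem_cons.mp hs with h | h
        · exact absurd h hst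
        · exact h
      have h1 : (pvBlk items task_order t).filter (fun p => pvSid p.2 == s) = [] := by
        refine List.filter_eq_nil_iff.mpr (fun p hp => ?_)
        have := mem_blk_sid hp
        simp [this]
        exact fun h => hst h.symm
      rw [h1, List.nil_append]
      exact ih (List.nodup_cons.mp hnd).2 hs'

theorem sorted_E (items : List (List (String × String))) (task_order : List (String × Int)) :
    PySem.List.sorted (pvE items) (pvKeyB (pvRank items) task_order)
      = (pvS items).flatMap (pvBlk items task_order) := by
  apply PySem.List.sorted_eq_of_perm_of_pairwise_lt
  · have h1 : ((pvS items).flatMap (pvBlk items task_order)).Perm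
        ((pvS items).flatMap (pvFilt items)) :=
      List.Perm.flatMap_left _ (fun s _ => blk_perm_filt items task_order s)
    refine h1.trans ?_
    refine partition_perm _ _ (PySem.Set.nodup_ofList _) (fun p hp => ?_)
    have : p.2 ∈ items := by
      obtain ⟨k, hk, rfl⟩ := (PySem.List.mem_enumerate_iff _ _ _).mp hp
      exact List.getElem_mem _
    exact (PySem.Set.mem_ofList _ _).mpr (List.mem_map_of_mem this)
  · rw [List.flatMap_def, List.pairwise_flatten]
    constructor
    · intro l hl
      obtain ⟨s, _, rfl⟩ := List.mem_map.mp hl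
      exact blk_pairwise_keyB items task_order s
    · rw [List.pairwise_map]
      refine (pvRank_pairwise items).imp (fun {s t} hlt => ?_)
      intro x hx y hy
      show toLex _ < toLex _
      rw [Prod.Lex.toLex_lt_toLex]
      left
      rw [mem_blk_sid hx, mem_blk_sid hy]
      exact hlt

theorem pvB_canon (items : List (List (String × String))) (task_order : List (String × Int)) :
    group_sample_indices_py_alt items task_order = pvCanon items task_order := by
  simp only [group_sample_indices_py_alt]
  have hr : (items.foldl
      (fun d item => if d.contains (pvSid item) then d else d.insert (pvSid item) (d.size : Int))
      PySem.Dict.empty) = pvRank items := rfl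
  rw [hr, show PySem.List.enumerate items 0 = pvE items from rfl, sorted_E items task_order,
    fold_modify_items ((pvS items).flatMap (pvBlk items task_order)) (fun p => p.1),
    ofList_flatMap_sid (pvBlk items task_order) (pvS items) (PySem.Set.nodup_ofList _)
      (fun s hs => blk_ne_nil items task_order s hs)
      (fun s _ p hp => mem_blk_sid hp)]
  refine List.map_congr_left (fun s hs => ?_)
  rw [flatMap_blk_filter items task_order s (pvS items) (PySem.Set.nodup_ofList _) hs]

-- ===== VERDICT (by name: the statement is the Claim_ definition above) =====
theorem group_sample_indices_py_spec : Claim_equal_group_sample_indices_py := by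
  intro items task_order _ _
  unfold Spec_group_sample_indices_py
  rw [pvA_canon, pvB_canon]
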